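-- pv_equiv track=rewrite | github.com/jgsmit/Abigael-AI | emotion_detection/companion_views.py | _classify_crisis_type
-- ===== SOURCE A (Python) =====
-- def _classify_crisis_type(keywords):
--     """Classify crisis type based on keywords"""
--     if any('suicidal' in kw or 'kill myself' in kw or 'end my life' in kw or 'want to die' in kw for kw in keywords):
--         return 'suicidal_ideation'
--     elif any('hurt myself' in kw or 'self harm' in kw for kw in keywords):
--         return 'mental_health'
--     elif any('addiction' in kw for kw in keywords):
--         return 'addiction'
--     elif any('abuse' in kw for kw in keywords):
--         return 'abuse'
--     else:
--         return 'emotional_crisis'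
-- ===== SOURCE B (Python) =====
-- _CRISIS_TABLE = [
--     ('suicidal_ideation', ['suicidal', 'kill myself', 'end my life', 'want to die']),
--     ('mental_health', ['hurt myself', 'self harm']),
--     ('addiction', ['addiction']),
--     ('abuse', ['abuse']),
-- ]
--
--
-- def _classify_crisis_type(keywords):
--     """Classify crisis type based on keywords"""
--     best = len(_CRISIS_TABLE)
--     for kw in keywords:
--         for i, (_, subs) in enumerate(_CRISIS_TABLE):
--             if any(sub in kw for sub in subs):
--                 if i < best:
--                     best = i
--                 break
--     return _CRISIS_TABLE[best][0] if best < len(_CRISIS_TABLE) else 'emotional_crisis'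
-- ===== Notes on version B (the rewrite author's own statement) =====
-- stated objective: alternative
-- what changed: Replaced the four separate any-passes over keywords by one ordered (crisis_type, substrings) priority table and a single pass over keywords maintaining the minimum matching table index.
import Mathlib
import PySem

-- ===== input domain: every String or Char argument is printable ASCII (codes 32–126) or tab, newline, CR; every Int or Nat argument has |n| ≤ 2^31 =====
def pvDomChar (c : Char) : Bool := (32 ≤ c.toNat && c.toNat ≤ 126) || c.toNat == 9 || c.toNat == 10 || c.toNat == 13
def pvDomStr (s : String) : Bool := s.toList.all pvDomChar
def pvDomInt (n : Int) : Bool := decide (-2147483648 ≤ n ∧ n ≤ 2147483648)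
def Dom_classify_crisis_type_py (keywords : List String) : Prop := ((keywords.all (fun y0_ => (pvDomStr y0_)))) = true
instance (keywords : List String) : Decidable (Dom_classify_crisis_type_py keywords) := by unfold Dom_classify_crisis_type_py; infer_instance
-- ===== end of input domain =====

-- B replaces A's four any-passes by one priority table and a single pass keeping the minimum matching index (alternative decomposition, same cost).

-- ===== PORT A =====
-- literal transliteration of A's if/elif cascade of any(...) generator passes
def classify_crisis_type_py (keywords : List String) : String :=
  if keywords.any (fun kw => PySem.Str.isIn "suicidal" kw || PySem.Str.isIn "kill myself" kw
      || PySem.Str.isIn "end my life" kw || PySem.Str.isIn "want to die" kw) then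
    "suicidal_ideation"
  else if keywords.any (fun kw => PySem.Str.isIn "hurt myself" kw || PySem.Str.isIn "self harm" kw) then
    "mental_health"
  else if keywords.any (fun kw => PySem.Str.isIn "addiction" kw) then
    "addiction"
  else if keywords.any (fun kw => PySem.Str.isIn "abuse" kw) then
    "abuse"
  else
    "emotional_crisis"

-- ===== PORT B =====
def crisisTable : List (String × List String) :=
  [("suicidal_ideation", ["suicidal", "kill myself", "end my life", "want to die"]),
   ("mental_health", ["hurt myself", "self harm"]),
   ("addiction", ["addiction"]),
   ("abuse", ["abuse"])]

-- inner loop of B: first table index whose substring list matches kw (length of the table if none)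
def kwIdx (kw : String) : Nat :=
  match crisisTable.findIdx? (fun e => e.2.any (fun sub => PySem.Str.isIn sub kw)) with
  | some i => i
  | none => crisisTable.length

def classify_crisis_type_py_alt (keywords : List String) : String :=
  let best := keywords.foldl (fun b kw => if kwIdx kw < b then kwIdx kw else b) crisisTable.length
  if best < crisisTable.length then (crisisTable.getD best ("", [])).1 else "emotional_crisis"

-- ===== PRECONDITION & SPEC =====
def Spec_classify_crisis_type_py (keywords : List String) (out : String) : Prop := out = classify_crisis_type_py_alt keywords
instance (keywords : List String) (out : String) : Decidable (Spec_classify_crisis_type_py keywords out) := by unfold Spec_classify_crisis_type_py; infer_instance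

-- ===== CLAIM (what is proved, stated in full; the proofs are below) =====
def Claim_equal_classify_crisis_type_py : Prop := ∀ (keywords : List String), Dom_classify_crisis_type_py keywords → Spec_classify_crisis_type_py keywords (classify_crisis_type_py keywords)

-- ===== LEMMAS AND PROOFS =====

def pA1 (kw : String) : Bool := PySem.Str.isIn "suicidal" kw || PySem.Str.isIn "kill myself" kw
      || PySem.Str.isIn "end my life" kw || PySem.Str.isIn "want to die" kw
def pA2 (kw : String) : Bool := PySem.Str.isIn "hurt myself" kw || PySem.Str.isIn "self harm" kw
def pA3 (kw : String) : Bool := PySem.Str.isIn "addiction" kw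
def pA4 (kw : String) : Bool := PySem.Str.isIn "abuse" kw

lemma kwIdx_eq (kw : String) :
    kwIdx kw = if pA1 kw then 0 else if pA2 kw then 1 else if pA3 kw then 2 else if pA4 kw then 3 else 4 := by
  simp only [kwIdx, crisisTable, List.findIdx?_cons, List.findIdx?_nil, List.any_cons,
    List.any_nil, pA1, pA2, pA3, pA4]
  split_ifs <;> simp_all

lemma kwIdx_le_iff (kw : String) (k : Nat) :
    kwIdx kw ≤ k ↔ ((k ≥ 0 ∧ pA1 kw) ∨ (k ≥ 1 ∧ pA2 kw) ∨ (k ≥ 2 ∧ pA3 kw) ∨ (k ≥ 3 ∧ pA4 kw) ∨ k ≥ 4) := by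
  rw [kwIdx_eq]
  split_ifs <;> simp_all <;> omega

lemma fold_le_iff (l : List String) (b k : Nat) :
    l.foldl (fun b kw => if kwIdx kw < b then kwIdx kw else b) b ≤ k ↔
      (b ≤ k ∨ ∃ kw ∈ l, kwIdx kw ≤ k) := by
  induction l generalizing b with
  | nil => simp
  | cons h t ih =>
      simp only [List.foldl_cons, ih, List.mem_cons]
      constructor
      · rintro (hb | ⟨kw, hmem, hk⟩)
        · by_cases hc : kwIdx h < b
          · simp only [hc, if_pos] at hb
            exact Or.inr ⟨h, Or.inl rfl, hb⟩
          · simp only [hc, if_false] at hb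
            exact Or.inl hb
        · exact Or.inr ⟨kw, Or.inr hmem, hk⟩
      · rintro (hb | ⟨kw, (rfl | hmem), hk⟩)
        · left; split <;> omega
        · left; split <;> omega
        · exact Or.inr ⟨kw, hmem, hk⟩

lemma fold_eq_iff_any (l : List String) (k : Nat) (hk : k < 4) :
    l.foldl (fun b kw => if kwIdx kw < b then kwIdx kw else b) 4 ≤ k ↔ ∃ kw ∈ l, kwIdx kw ≤ k := by
  rw [fold_le_iff]
  have h4 : ¬ (4 ≤ k) := by omega
  tauto

lemma any_eq_exists {l : List String} {p : String → Bool} :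
    l.any p = true ↔ ∃ kw ∈ l, p kw = true := List.any_eq_true

lemma B_eq (keywords : List String) :
    classify_crisis_type_py_alt keywords =
      if keywords.any pA1 then "suicidal_ideation"
      else if keywords.any pA2 then "mental_health"
      else if keywords.any pA3 then "addiction"
      else if keywords.any pA4 then "abuse"
      else "emotional_crisis" := by
  unfold classify_crisis_type_py_alt
  have hlen : crisisTable.length = 4 := rfl
  rw [hlen]
  set m := keywords.foldl (fun b kw => if kwIdx kw < b then kwIdx kw else b) 4 with hm
  have h0 : m ≤ 0 ↔ ∃ kw ∈ keywords, kwIdx kw ≤ 0 := fold_eq_iff_any _ 0 (by omega)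
  have h1 : m ≤ 1 ↔ ∃ kw ∈ keywords, kwIdx kw ≤ 1 := fold_eq_iff_any _ 1 (by omega)
  have h2 : m ≤ 2 ↔ ∃ kw ∈ keywords, kwIdx kw ≤ 2 := fold_eq_iff_any _ 2 (by omega)
  have h3 : m ≤ 3 ↔ ∃ kw ∈ keywords, kwIdx kw ≤ 3 := fold_eq_iff_any _ 3 (by omega)
  have h4 : m ≤ 4 := by rw [hm, fold_le_iff]; left; omega
  simp only [kwIdx_le_iff] at h0 h1 h2 h3
  by_cases c1 : keywords.any pA1 = true
  · have hme : m = 0 := by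
      have := h0.2 (by rcases any_eq_exists.mp c1 with ⟨kw, hk, hp⟩; exact ⟨kw, hk, by simp [hp]⟩)
      omega
    rw [hme]; simp [c1]; rfl
  · have n1 : ∀ kw ∈ keywords, pA1 kw = false := fun kw hkw =>
      Bool.eq_false_iff.mpr (fun h => c1 (any_eq_exists.mpr ⟨kw, hkw, h⟩))
    by_cases c2 : keywords.any pA2 = true
    · have hme : m = 1 := by
        have u : m ≤ 1 := h1.2 (by rcases any_eq_exists.mp c2 with ⟨kw, hk, hp⟩; exact ⟨kw, hk, by simp [hp]⟩)
        have l0 : ¬ m ≤ 0 := by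
          intro h; rcases h0.1 h with ⟨kw, hkw, hor⟩
          rcases hor with (⟨_, hp⟩ | ⟨hk, _⟩ | ⟨hk, _⟩ | ⟨hk, _⟩ | hk) <;>
            (have := n1 kw hkw; simp_all)
        omega
      rw [hme]; simp [c1, c2]; rfl
    · have n2 : ∀ kw ∈ keywords, pA2 kw = false := fun kw hkw =>
        Bool.eq_false_iff.mpr (fun h => c2 (any_eq_exists.mpr ⟨kw, hkw, h⟩))
      by_cases c3 : keywords.any pA3 = true
      · have hme : m = 2 := by
          have u : m ≤ 2 := h2.2 (by rcases any_eq_exists.mp c3 with ⟨kw, hk, hp⟩; exact ⟨kw, hk, by simp [hp]⟩)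
          have l1 : ¬ m ≤ 1 := by
            intro h; rcases h1.1 h with ⟨kw, hkw, hor⟩
            rcases hor with (⟨_, hp⟩ | ⟨_, hp⟩ | ⟨hk, _⟩ | ⟨hk, _⟩ | hk) <;>
              (have := n1 kw hkw; have := n2 kw hkw; simp_all)
          omega
        rw [hme]; simp [c1, c2, c3]; rfl
      · have n3 : ∀ kw ∈ keywords, pA3 kw = false := fun kw hkw =>
          Bool.eq_false_iff.mpr (fun h => c3 (any_eq_exists.mpr ⟨kw, hkw, h⟩))
        by_cases c4 : keywords.any pA4 = true
        · have hme : m = 3 := by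
            have u : m ≤ 3 := h3.2 (by rcases any_eq_exists.mp c4 with ⟨kw, hk, hp⟩; exact ⟨kw, hk, by simp [hp]⟩)
            have l2 : ¬ m ≤ 2 := by
              intro h; rcases h2.1 h with ⟨kw, hkw, hor⟩
              rcases hor with (⟨_, hp⟩ | ⟨_, hp⟩ | ⟨_, hp⟩ | ⟨hk, _⟩ | hk) <;>
                (have := n1 kw hkw; have := n2 kw hkw; have := n3 kw hkw; simp_all)
            omega
          rw [hme]; simp [c1, c2, c3, c4]; rfl
        · have n4 : ∀ kw ∈ keywords, pA4 kw = false := fun kw hkw =>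
            Bool.eq_false_iff.mpr (fun h => c4 (any_eq_exists.mpr ⟨kw, hkw, h⟩))
          have hme : m = 4 := by
            have l3 : ¬ m ≤ 3 := by
              intro h; rcases h3.1 h with ⟨kw, hkw, hor⟩
              rcases hor with (⟨_, hp⟩ | ⟨_, hp⟩ | ⟨_, hp⟩ | ⟨_, hp⟩ | hk) <;>
                (have := n1 kw hkw; have := n2 kw hkw; have := n3 kw hkw;
                 have := n4 kw hkw; simp_all)
            omega
          rw [hme]; simp [c1, c2, c3, c4]

-- ===== VERDICT (by name: the statement is the Claim_ definition above) =====
theorem classify_crisis_type_py_spec : Claim_equal_classify_crisis_type_py := by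
  intro keywords _
  unfold Spec_classify_crisis_type_py
  rw [B_eq]
  rfl
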